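-- pv_equiv track=rewrite | github.com/Cristox1/Parcial2-Lenguajes-De-Programacion-Cristian-Reinales | Ejercicio5/prueba_yacc.py | generar_cadena_booleana
-- ===== SOURCE A (Python) =====
-- def generar_cadena_booleana(n):
--     partes = ["true"]
--     for i in range(n):
--         if i % 2 == 0:
--             partes.append("OR false")
--         else:
--             partes.append("AND true")
--     return " ".join(partes) + "\n"
-- ===== SOURCE B (Python) =====
-- def generar_cadena_booleana(n):
--     pairs = max(n, 0) // 2
--     cadena = "true" + " OR false AND true" * pairs
--     if n > 0 and n % 2 == 1:
--         cadena += " OR false"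
--     return cadena + "\n"
-- ===== Notes on version B (the rewrite author's own statement) =====
-- stated objective: simpler
-- what changed: Replaces the per-index alternating loop with list append and join by a closed-form build: 'true' plus the two-token cycle ' OR false AND true' repeated max(n,0)//2 times, plus ' OR false' when n is positive and odd.
import Mathlib
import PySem

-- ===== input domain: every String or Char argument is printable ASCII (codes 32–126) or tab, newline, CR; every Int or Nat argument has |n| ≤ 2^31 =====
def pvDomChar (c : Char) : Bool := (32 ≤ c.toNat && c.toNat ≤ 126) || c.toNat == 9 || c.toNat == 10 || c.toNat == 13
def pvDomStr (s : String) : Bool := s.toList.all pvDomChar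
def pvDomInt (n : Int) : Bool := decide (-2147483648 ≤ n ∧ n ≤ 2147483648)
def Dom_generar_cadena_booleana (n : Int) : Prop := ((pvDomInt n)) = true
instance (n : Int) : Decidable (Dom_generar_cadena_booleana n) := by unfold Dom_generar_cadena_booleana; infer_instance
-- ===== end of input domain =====

-- B builds the result by closed-form repetition of the two-token cycle instead of A's per-index i%2 loop (objective: simpler).

-- ===== PORT A =====
def generar_cadena_booleana (n : Int) : String :=
  let partes := (PySem.List.pyRange 0 n 1).foldl
    (fun partes i =>
      if PySem.Int.mod i 2 = 0 then partes ++ ["OR false"] else partes ++ ["AND true"])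
    ["true"]
  PySem.Str.join " " partes ++ "\n"

-- ===== PORT B =====
-- '" OR false AND true" * pairs' (Python string repetition)
def pvStrTimes (s : String) : Nat → String
  | 0 => ""
  | k + 1 => s ++ pvStrTimes s k

def generar_cadena_booleana_alt (n : Int) : String :=
  let pairs := PySem.Int.floordiv (max n 0) 2
  let cadena := "true" ++ pvStrTimes " OR false AND true" pairs.toNat
  let cadena := if 0 < n ∧ PySem.Int.mod n 2 = 1 then cadena ++ " OR false" else cadena
  cadena ++ "\n"

-- ===== PRECONDITION & SPEC =====
def Spec_generar_cadena_booleana (n : Int) (out : String) : Prop := out = generar_cadena_booleana_alt n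
instance (n : Int) (out : String) : Decidable (Spec_generar_cadena_booleana n out) := by unfold Spec_generar_cadena_booleana; infer_instance

-- ===== CLAIM (what is proved, stated in full; the proofs are below) =====
def Claim_equal_generar_cadena_booleana : Prop := ∀ (n : Int), Dom_generar_cadena_booleana n → Spec_generar_cadena_booleana n (generar_cadena_booleana n)

-- ===== LEMMAS AND PROOFS =====

-- the alternating element appended at loop index k
def pvElem (k : Nat) : String := if k % 2 = 0 then "OR false" else "AND true"

-- the characters A's loop contributes after the initial "true"
def pvSfx : Nat → List Char
  | 0 => []
  | 1 => " OR false".toList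
  | m + 2 => " OR false AND true".toList ++ pvSfx m

theorem pv_join_cons (sep h : List Char) (L : List (List Char)) :
    PySem.Chars.join sep (h :: L) = h ++ (L.map (sep ++ ·)).flatten := by
  induction L generalizing h with
  | nil => simp [PySem.Chars.join, List.intercalate]
  | cons q rest ih =>
      rw [PySem.Chars.join_cons_cons, ih q]
      simp

theorem pv_flatten_eq_sfx (m : Nat) :
    ((List.range m).map (fun k => [' '] ++ (pvElem k).toList)).flatten = pvSfx m := by
  induction m using Nat.twoStepInduction with
  | zero => decide
  | one => decide
  | more m ih _ =>
      rw [List.range_succ_eq_map, List.range_succ_eq_map]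
      simp only [List.map_cons, List.map_map, List.flatten_cons, Function.comp_def, Nat.succ_eq_add_one]
      have hper : ∀ k : Nat, pvElem (k + 1 + 1) = pvElem k := by
        intro k
        have h : (k + 1 + 1) % 2 = k % 2 := by omega
        simp only [pvElem, h]
      simp only [hper]
      rw [pvSfx, ← ih]
      simp [pvElem]
  -- placeholder; fixed below

theorem pv_sfx_closed (m : Nat) :
    pvSfx m = (pvStrTimes " OR false AND true" (m / 2)).toList ++
      (if m % 2 = 1 then " OR false".toList else []) := by
  induction m using Nat.twoStepInduction with
  | zero => decide
  | one => decide
  | more m ih _ =>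
      have h2 : (m + 2) / 2 = m / 2 + 1 := by omega
      have h3 : (m + 2) % 2 = m % 2 := by omega
      rw [pvSfx, ih, h2, h3, pvStrTimes]
      simp

-- ===== VERDICT (by name: the statement is the Claim_ definition above) =====
theorem generar_cadena_booleana_spec : Claim_equal_generar_cadena_booleana := by
  intro n _
  unfold Spec_generar_cadena_booleana generar_cadena_booleana generar_cadena_booleana_alt
  have hfun : (fun (partes : List String) (i : Int) =>
      if PySem.Int.mod i 2 = 0 then partes ++ ["OR false"] else partes ++ ["AND true"]) =
      fun partes i => partes ++ [if PySem.Int.mod i 2 = 0 then "OR false" else "AND true"] := by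
    funext p i; split_ifs <;> rfl
  simp only [hfun, PySem.List.foldl_append_singleton_eq_map]
  by_cases hn : n ≤ 0
  · rw [PySem.List.pyRange_one_eq_nil hn]
    rw [show max n 0 = 0 from by omega, if_neg (fun h => absurd h.1 (by omega))]
    decide
  · rw [not_le] at hn
    lift n to Nat using hn.le with m
    rw [PySem.List.pyRange_one, show ((m : Int) - 0).toNat = m from by omega]
    apply String.toList_inj.mp
    simp only [String.toList_append, PySem.Str.toList_join, List.map_map,
      List.map_cons, List.singleton_append]
    rw [pv_join_cons]
    have hmod : PySem.Int.mod ((m : Nat) : Int) 2 = ((m % 2 : Nat) : Int) := by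
      exact_mod_cast PySem.Int.mod_natCast m 2
    have hfd : PySem.Int.floordiv ((m : Nat) : Int) 2 = ((m / 2 : Nat) : Int) := by
      exact_mod_cast PySem.Int.floordiv_natCast m 2
    have hmax : max ((m : Nat) : Int) 0 = ((m : Nat) : Int) := by omega
    have hm2 : ∀ k : Nat, PySem.Int.mod ((k : Nat) : Int) 2 = ((k % 2 : Nat) : Int) := by
      intro k; exact_mod_cast PySem.Int.mod_natCast k 2
    have hmfun : (List.map (" ".toList ++ ·)
        (List.map (String.toList ∘ (fun x : Int => if PySem.Int.mod x 2 = 0 then "OR false" else "AND true") ∘ fun k : Nat => 0 + (k : Int)) (List.range m))) =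
        List.map (fun k : Nat => [' '] ++ (pvElem k).toList) (List.range m) := by
      rw [List.map_map]
      refine List.map_congr_left ?_
      intro k _
      simp only [Function.comp_apply, zero_add, hm2 k, pvElem]
      by_cases h : k % 2 = 0
      · rw [if_pos (by exact_mod_cast h), if_pos h]; rfl
      · rw [if_neg (by omega), if_neg h]; rfl
    rw [hmfun, pv_flatten_eq_sfx, pv_sfx_closed]
    have hcond : ((0 : Int) < (m : Nat) ∧ PySem.Int.mod ((m : Nat) : Int) 2 = 1) ↔ m % 2 = 1 := by
      rw [hmod]
      constructor
      · intro h; exact_mod_cast h.2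
      · intro h; exact ⟨hn, by exact_mod_cast h⟩
    simp only [hmax, hfd, Int.toNat_natCast, hcond]
    by_cases hodd : m % 2 = 1 <;> simp [hodd, String.toList_append, List.append_assoc]
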